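-- pv_equiv track=rewrite | github.com/snakemake/snakemake | snakemake/utils.py | argvquote
-- ===== SOURCE A (Python) =====
-- def argvquote(arg, force=True):
--     """Returns an argument quoted in such a way that CommandLineToArgvW
--     on Windows will return the argument string unchanged.
--     This is the same thing Popen does when supplied with a list of arguments.
--     Arguments in a command line should be separated by spaces; this
--     function does not add these spaces. This implementation follows the
--     suggestions outlined here:
--     https://blogs.msdn.microsoft.com/twistylittlepassagesallalike/2011/04/23/everyone-quotes-command-line-arguments-the-wrong-way/
--     """
--     if not force and len(arg) != 0 and not any([c in arg for c in ' \t\n\v"']):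
--         return arg
--     else:
--         n_backslashes = 0
--         cmdline = '"'
--         for c in arg:
--             if c == "\\":
--                 # first count the number of current backslashes
--                 n_backslashes += 1
--                 continue
--             if c == '"':
--                 # Escape all backslashes and the following double quotation mark
--                 cmdline += (n_backslashes * 2 + 1) * "\\"
--             else:
--                 # backslashes are not special here
--                 cmdline += n_backslashes * "\\"
--             n_backslashes = 0
--             cmdline += c
--         # Escape all backslashes, but let the terminating
--         # double quotation mark we add below be interpreted
--         # as a metacharacter
--         cmdline += +n_backslashes * 2 * "\\" + '"'
--         return cmdline
-- ===== SOURCE B (Python) =====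
-- def argvquote(arg, force=True):
--     if not force and len(arg) != 0 and not any(c in ' \t\n\v"' for c in arg):
--         return arg
--
--     def dbl(p):
--         # double the trailing backslash run of a quote-free piece
--         return p + "\\" * (len(p) - len(p.rstrip("\\")))
--
--     return '"' + '\\"'.join(dbl(p) for p in arg.split('"')) + '"'
-- ===== Notes on version B (the rewrite author's own statement) =====
-- stated objective: alternative
-- what changed: Replaces A's single-pass per-character backslash-counting state machine with a structural pipeline: split the argument at double-quote characters, double each piece's trailing backslash run, join the pieces with an escaped double quote and wrap the result in double quotes.
import Mathlib
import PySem

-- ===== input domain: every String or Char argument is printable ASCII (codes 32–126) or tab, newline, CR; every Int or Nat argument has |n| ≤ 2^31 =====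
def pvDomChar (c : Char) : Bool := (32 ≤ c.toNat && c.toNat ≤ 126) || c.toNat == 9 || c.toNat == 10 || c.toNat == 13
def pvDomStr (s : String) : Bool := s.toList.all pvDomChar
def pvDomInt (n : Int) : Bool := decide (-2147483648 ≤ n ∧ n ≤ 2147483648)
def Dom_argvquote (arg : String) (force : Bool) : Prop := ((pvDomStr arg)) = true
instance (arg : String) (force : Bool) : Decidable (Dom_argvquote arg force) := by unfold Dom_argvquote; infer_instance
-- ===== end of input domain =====

-- B replaces A's per-character backslash-counting loop by split-on-quote /
-- double-trailing-backslashes / join-with-escaped-quote (objective: alternative).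


-- ===== PORT A =====
-- the loop body: state = (n_backslashes, cmdline)
def pvStepA (st : Nat × List Char) (c : Char) : Nat × List Char :=
  if c = '\\' then (st.1 + 1, st.2)
  else if c = '"' then (0, st.2 ++ List.replicate (st.1 * 2 + 1) '\\' ++ [c])
  else (0, st.2 ++ List.replicate st.1 '\\' ++ [c])

def argvquote (arg : String) (force : Bool) : String :=
  if !force && !(PySem.Chars.len arg.toList == 0) &&
      !([' ', '\t', '\n', '\x0b', '"'].any (fun c => PySem.Chars.isIn [c] arg.toList)) then
    arg
  else
    let st := arg.toList.foldl pvStepA (0, ['"'])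
    String.mk (st.2 ++ List.replicate (st.1 * 2) '\\' ++ ['"'])

-- ===== PORT B =====
-- hand port of p.rstrip("\\") (exact for the single-char case)
def pvRstripBS (p : List Char) : List Char := (p.reverse.dropWhile (· == '\\')).reverse

-- dbl: double the trailing backslash run
def pvDbl (p : List Char) : List Char :=
  p ++ List.replicate (p.length - (pvRstripBS p).length) '\\'

-- hand port of str.split(sep) for a single-char separator (exact)
def pvSplitQ : List Char → List (List Char)
  | [] => [[]]
  | c :: rest => if c = '"' then [] :: pvSplitQ rest else (pvSplitQ rest).modifyHead (c :: ·)

-- hand port of sep.join(parts) (exact)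
def pvJoin (sep : List Char) : List (List Char) → List Char
  | [] => []
  | [p] => p
  | p :: ps => p ++ sep ++ pvJoin sep ps

def argvquote_alt (arg : String) (force : Bool) : String :=
  if !force && !(PySem.Chars.len arg.toList == 0) &&
      !(arg.toList.any (fun c => c ∈ [' ', '\t', '\n', '\x0b', '"'])) then
    arg
  else
    String.mk ('"' :: pvJoin ['\\', '"'] ((pvSplitQ arg.toList).map pvDbl) ++ ['"'])

-- ===== PRECONDITION & SPEC =====
def Spec_argvquote (arg : String) (force : Bool) (out : String) : Prop := out = argvquote_alt arg force
instance (arg : String) (force : Bool) (out : String) : Decidable (Spec_argvquote arg force out) := by unfold Spec_argvquote; infer_instance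

-- ===== CLAIM (what is proved, stated in full; the proofs are below) =====
def Claim_equal_argvquote : Prop := ∀ (arg : String) (force : Bool), Dom_argvquote arg force → Spec_argvquote arg force (argvquote arg force)

-- ===== LEMMAS AND PROOFS =====

-- recursive characterisation of A's loop, n = pending backslashes
def quoteRec : List Char → Nat → List Char
  | [], n => List.replicate (n * 2) '\\' ++ ['"']
  | c :: rest, n =>
    if c = '\\' then quoteRec rest (n + 1)
    else if c = '"' then List.replicate (n * 2 + 1) '\\' ++ c :: quoteRec rest 0
    else List.replicate n '\\' ++ c :: quoteRec rest 0

-- B's core on char lists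
def bCore (cs : List Char) : List Char :=
  pvJoin ['\\', '"'] ((pvSplitQ cs).map pvDbl) ++ ['"']

theorem foldA_eq (cs : List Char) : ∀ (n : Nat) (acc : List Char),
    (cs.foldl pvStepA (n, acc)).2
      ++ List.replicate ((cs.foldl pvStepA (n, acc)).1 * 2) '\\' ++ ['"']
      = acc ++ quoteRec cs n := by
  induction cs with
  | nil => intro n acc; simp [quoteRec]
  | cons c rest ih =>
    intro n acc
    by_cases h1 : c = '\\'
    · rw [List.foldl_cons]
      simp only [pvStepA, if_pos h1, quoteRec, ih]
    · by_cases h2 : c = '"'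
      · rw [List.foldl_cons]
        simp only [pvStepA, if_neg h1, if_pos h2, quoteRec, ih]
        subst h2; simp [h1]
      · rw [List.foldl_cons]
        simp only [pvStepA, if_neg h1, if_neg h2, quoteRec, ih]
        simp [h1, h2]

theorem splitQ_ne_nil (cs : List Char) : pvSplitQ cs ≠ [] := by
  cases cs with
  | nil => simp [pvSplitQ]
  | cons c rest =>
    simp only [pvSplitQ]
    split
    · simp
    · cases h : pvSplitQ rest with
      | nil => exact absurd h (splitQ_ne_nil rest)
      | cons p ps => simp [List.modifyHead]

theorem splitQ_prepend (xs : List Char) (cs : List Char) (hx : '"' ∉ xs) :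
    pvSplitQ (xs ++ cs) = (pvSplitQ cs).modifyHead (xs ++ ·) := by
  induction xs with
  | nil =>
    cases h : pvSplitQ cs with
    | nil => exact absurd h (splitQ_ne_nil cs)
    | cons p ps => simp [h]
  | cons x xs ih =>
    have hx1 : x ≠ '"' := fun h => hx (by simp [h])
    have hx2 : '"' ∉ xs := fun h => hx (by simp [h])
    rw [List.cons_append]
    simp only [pvSplitQ, if_neg hx1, ih hx2]
    cases h : pvSplitQ cs with
    | nil => exact absurd h (splitQ_ne_nil cs)
    | cons p ps => simp [List.modifyHead]

theorem dropWhile_bs_replicate (n : Nat) :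
    List.dropWhile (· == '\\') (List.replicate n '\\') = [] := by
  induction n with
  | zero => simp
  | succ n ih => simp [List.replicate_succ, List.dropWhile, ih]

theorem dbl_replicate (n : Nat) :
    pvDbl (List.replicate n '\\') = List.replicate (n * 2) '\\' := by
  have h : pvRstripBS (List.replicate n '\\') = [] := by
    simp [pvRstripBS, dropWhile_bs_replicate]
  simp only [pvDbl, h, List.length_nil, List.length_replicate, Nat.sub_zero]
  rw [← List.replicate_add]
  congr 1
  omega

theorem dropWhile_append_stop (q : Char → Bool) (as bs : List Char) (c : Char) (h : q c = false) :
    List.dropWhile q (as ++ c :: bs) = List.dropWhile q as ++ c :: bs := by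
  induction as with
  | nil => simp [List.dropWhile, h]
  | cons a as ih =>
    by_cases ha : q a
    · simp [List.dropWhile, ha, ih]
    · simp [List.dropWhile, ha]

theorem dbl_prepend (xs : List Char) (c : Char) (p : List Char) (h : c ≠ '\\') :
    pvDbl (xs ++ c :: p) = xs ++ c :: pvDbl p := by
  have hc : ((fun x => x == '\\') c : Bool) = false := by simp [h]
  have hr : pvRstripBS (xs ++ c :: p) = xs ++ c :: pvRstripBS p := by
    simp only [pvRstripBS, List.reverse_append, List.reverse_cons]
    rw [List.append_assoc, List.singleton_append,
      dropWhile_append_stop (fun x => x == '\\') _ _ _ hc]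
    simp
  simp only [pvDbl, hr, List.length_append, List.length_cons]
  have hlen : xs.length + (p.length + 1) - (xs.length + ((pvRstripBS p).length + 1))
      = p.length - (pvRstripBS p).length := by omega
  rw [hlen]
  simp

theorem pvJoin_cons (sep p : List Char) (ps : List (List Char)) (h : ps ≠ []) :
    pvJoin sep (p :: ps) = p ++ sep ++ pvJoin sep ps := by
  cases ps with
  | nil => exact absurd rfl h
  | cons q qs => rfl

theorem quoteRec_eq_bCore (cs : List Char) : ∀ (n : Nat),
    quoteRec cs n = bCore (List.replicate n '\\' ++ cs) := by
  induction cs with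
  | nil =>
    intro n
    have h := splitQ_prepend (List.replicate n '\\') [] (by simp [List.mem_replicate])
    rw [show pvSplitQ ([] : List Char) = [[]] from rfl, List.modifyHead_cons,
      List.append_nil] at h
    simp [quoteRec, bCore, h, pvJoin, dbl_replicate]
  | cons c rest ih =>
    intro n
    by_cases h1 : c = '\\'
    · subst h1
      have harg : List.replicate n '\\' ++ '\\' :: rest
          = List.replicate (n + 1) '\\' ++ rest := by
        rw [List.replicate_succ' (n := n)]; simp
      simp [quoteRec, harg, ih]
    · by_cases h2 : c = '"'
      · subst h2
        have hsq : pvSplitQ ('"' :: rest) = [] :: pvSplitQ rest := by simp [pvSplitQ]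
        have h := splitQ_prepend (List.replicate n '\\') ('"' :: rest)
          (by simp [List.mem_replicate])
        rw [hsq, List.modifyHead_cons, List.append_nil] at h
        have hne : (pvSplitQ rest).map pvDbl ≠ [] := by
          simpa using splitQ_ne_nil rest
        rw [show quoteRec ('"' :: rest) n
            = List.replicate (n * 2 + 1) '\\' ++ '"' :: quoteRec rest 0 from by
          simp [quoteRec, h1]]
        rw [ih 0]
        simp only [bCore, h, List.map_cons, List.replicate_zero, List.nil_append]
        rw [pvJoin_cons _ _ _ hne, dbl_replicate]
        simp [List.replicate_succ']
      · have hx : '"' ∉ List.replicate n '\\' ++ [c] := by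
          intro hmem
          rcases List.mem_append.mp hmem with h' | h'
          · exact absurd (List.eq_of_mem_replicate h') (by decide)
          · exact h2 (List.mem_singleton.mp h').symm
        have h := splitQ_prepend (List.replicate n '\\' ++ [c]) rest hx
        cases hs : pvSplitQ rest with
        | nil => exact absurd hs (splitQ_ne_nil rest)
        | cons p ps =>
          rw [hs, List.modifyHead_cons] at h
          rw [show quoteRec (c :: rest) n
              = List.replicate n '\\' ++ c :: quoteRec rest 0 from by
            simp [quoteRec, h1, h2]]
          rw [ih 0]
          simp only [bCore, List.replicate_zero, List.nil_append, hs]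
          rw [show List.replicate n '\\' ++ c :: rest
              = (List.replicate n '\\' ++ [c]) ++ rest from by simp]
          rw [h, List.map_cons, List.map_cons]
          rw [show List.replicate n '\\' ++ [c] ++ p
              = List.replicate n '\\' ++ c :: p from by simp]
          rw [dbl_prepend _ _ _ h1]
          cases ps with
          | nil => simp [pvJoin]
          | cons q qs =>
            rw [List.map_cons]
            have e1 := pvJoin_cons ['\\', '"'] (pvDbl p)
              (pvDbl q :: List.map pvDbl qs) (by simp)
            have e2 := pvJoin_cons ['\\', '"']
              (List.replicate n '\\' ++ c :: pvDbl p)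
              (pvDbl q :: List.map pvDbl qs) (by simp)
            rw [e1, e2]
            simp

theorem singleton_infix_iff {c : Char} {s : List Char} : [c] <:+: s ↔ c ∈ s := by
  constructor
  · intro h
    exact (List.singleton_sublist).mp h.sublist
  · intro h
    obtain ⟨l1, l2, rfl⟩ := List.mem_iff_append.mp h
    exact ⟨l1, l2, by simp⟩

theorem cond_eq (s : List Char) :
    ([' ', '\t', '\n', '\x0b', '"'].any (fun c => PySem.Chars.isIn [c] s))
      = (s.any (fun c => c ∈ [' ', '\t', '\n', '\x0b', '"'])) := by
  rw [Bool.eq_iff_iff]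
  simp only [List.any_eq_true, PySem.Chars.isIn_iff_infix]
  constructor
  · rintro ⟨c, hc, h⟩
    exact ⟨c, singleton_infix_iff.mp h, by simpa using hc⟩
  · rintro ⟨c, hc, h⟩
    exact ⟨c, by simpa using h, singleton_infix_iff.mpr hc⟩

-- ===== VERDICT (by name: the statement is the Claim_ definition above) =====
theorem argvquote_spec : Claim_equal_argvquote := by
  intro arg force _
  unfold Spec_argvquote argvquote argvquote_alt
  rw [cond_eq arg.toList]
  split
  · rfl
  · have h := foldA_eq arg.toList 0 ['"']
    simp only [h, quoteRec_eq_bCore arg.toList 0]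
    simp [bCore]
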